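-- pv_equiv track=rewrite | github.com/prestontw/LotteryWinners | template.py | makeConfigurationAscending
-- ===== SOURCE A (Python) =====
-- def makeConfigurationAscending(configuration):
--     pivot = len(configuration) // 2
--     for index in range(pivot):
--         if configuration[index] >= pivot:
--             # then start looking for a small number to the right of pivot
--             for switchIndex in range(pivot, len(configuration)):
--                 if configuration[switchIndex] < pivot:
--                     # then swap the two numbers
--                     temp = configuration[index]
--                     configuration[index] = configuration[switchIndex]
--                     configuration[switchIndex] = temp
--
--                     return configuration
--
--     # else given configuration works
--     return configuration
-- ===== SOURCE B (Python) =====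
-- def makeConfigurationAscending(configuration):
--     # Two independent linear scans instead of A's nested loops; mutates in place like A.
--     pivot = len(configuration) // 2
--     i = next((k for k in range(pivot) if configuration[k] >= pivot), None)
--     j = next((k for k in range(pivot, len(configuration)) if configuration[k] < pivot), None)
--     if i is not None and j is not None:
--         configuration[i], configuration[j] = configuration[j], configuration[i]
--     return configuration
-- ===== Notes on version B (the rewrite author's own statement) =====
-- stated objective: simpler
-- what changed: Replaces A's nested loops (for each big left element, rescan the whole right half) by two independent single scans computing the first big-left index and the first small-right index, then one swap; works because the right-half scan is independent of the left index.
import Mathlib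
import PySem

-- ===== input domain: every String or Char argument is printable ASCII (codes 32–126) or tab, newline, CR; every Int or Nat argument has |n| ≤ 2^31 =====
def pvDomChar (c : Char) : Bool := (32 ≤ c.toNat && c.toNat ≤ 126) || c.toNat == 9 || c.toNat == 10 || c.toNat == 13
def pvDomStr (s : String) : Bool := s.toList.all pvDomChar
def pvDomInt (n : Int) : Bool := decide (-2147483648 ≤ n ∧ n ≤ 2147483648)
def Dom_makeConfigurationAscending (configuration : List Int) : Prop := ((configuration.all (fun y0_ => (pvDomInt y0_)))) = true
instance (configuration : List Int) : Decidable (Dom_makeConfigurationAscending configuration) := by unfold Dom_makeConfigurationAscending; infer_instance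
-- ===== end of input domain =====

-- B replaces A's nested loops by two independent first-index scans plus one swap (simpler);
-- both Pythons mutate the list in place identically, the theorem is about the returned value.


-- ===== PORT A =====
-- the swap of two list cells (Python's temp/assign triple and Source B's tuple swap);
-- every index fed to it comes from a range over the list, so the getD defaults never fire
def pvSwap (conf : List Int) (i j : Nat) : List Int :=
  (conf.set i (conf[j]?.getD 0)).set j (conf[i]?.getD 0)

-- inner loop of A: 'for switchIndex in range(pivot, len): if conf[switchIndex] < pivot: swap; return'
def pvAInner (conf : List Int) (pivot : Int) (index : Nat) : List Nat → Option (List Int)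
  | [] => none
  | j :: rest =>
    if conf[j]?.getD 0 < pivot then some (pvSwap conf index j)
    else pvAInner conf pivot index rest

-- outer loop of A: 'for index in range(pivot): if conf[index] >= pivot: <inner loop over range(pivot, len)>'
def pvAOuter (conf : List Int) (pivot : Int) : List Nat → List Int
  | [] => conf
  | i :: rest =>
    if pivot ≤ conf[i]?.getD 0 then
      match pvAInner conf pivot i (List.range' (conf.length / 2) (conf.length - conf.length / 2)) with
      | some r => r
      | none => pvAOuter conf pivot rest
    else pvAOuter conf pivot rest

-- pivot = len(configuration) // 2: floor division of nonnegative numbers, exactly Nat division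
def makeConfigurationAscending (configuration : List Int) : List Int :=
  pvAOuter configuration ((configuration.length / 2 : Nat) : Int) (List.range (configuration.length / 2))

-- ===== PORT B =====
-- B (Source B): the two 'next(...)' scans — first left-half index holding a big value,
-- first right-half index holding a small value — then a single conditional swap.
def makeConfigurationAscending_alt (configuration : List Int) : List Int :=
  let pivot : Nat := configuration.length / 2
  let i? := List.find? (fun k => decide ((pivot : Int) ≤ configuration[k]?.getD 0)) (List.range pivot)
  let j? := List.find? (fun k => decide (configuration[k]?.getD 0 < (pivot : Int)))
              (List.range' pivot (configuration.length - pivot))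
  match i?, j? with
  | some i, some j => pvSwap configuration i j
  | _, _ => configuration

-- ===== PRECONDITION & SPEC =====
def Spec_makeConfigurationAscending (configuration : List Int) (out : List Int) : Prop := out = makeConfigurationAscending_alt configuration
instance (configuration : List Int) (out : List Int) : Decidable (Spec_makeConfigurationAscending configuration out) := by unfold Spec_makeConfigurationAscending; infer_instance

-- ===== CLAIM (what is proved, stated in full; the proofs are below) =====
def Claim_equal_makeConfigurationAscending : Prop := ∀ (configuration : List Int), Dom_makeConfigurationAscending configuration → Spec_makeConfigurationAscending configuration (makeConfigurationAscending configuration)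

-- ===== LEMMAS AND PROOFS =====

-- A's inner loop is the first-match scan followed by the swap
theorem pvAInner_eq_find (conf : List Int) (pivot : Int) (index : Nat) (js : List Nat) :
    pvAInner conf pivot index js
      = Option.map (pvSwap conf index) (List.find? (fun k => decide (conf[k]?.getD 0 < pivot)) js) := by
  induction js with
  | nil => simp [pvAInner]
  | cons j rest ih =>
      by_cases h : conf[j]?.getD 0 < pivot <;> simp [pvAInner, List.find?, h, ih]

-- A's outer loop: if the right half holds no small value the list comes back unchanged no matter
-- how many big left indices are tried; otherwise the swap happens at the first big left index.
theorem pvAOuter_eq (conf : List Int) (pivot : Int) (is : List Nat) :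
    pvAOuter conf pivot is
      = match List.find? (fun k => decide (pivot ≤ conf[k]?.getD 0)) is,
              List.find? (fun k => decide (conf[k]?.getD 0 < pivot))
                (List.range' (conf.length / 2) (conf.length - conf.length / 2)) with
        | some i, some j => pvSwap conf i j
        | _, _ => conf := by
  induction is with
  | nil =>
      cases List.find? (fun k => decide (conf[k]?.getD 0 < pivot)) (List.range' (conf.length / 2) (conf.length - conf.length / 2)) <;>
        simp [pvAOuter, List.find?]
  | cons i rest ih =>
      by_cases hi : pivot ≤ conf[i]?.getD 0 <;>
        cases h : List.find? (fun k => decide (conf[k]?.getD 0 < pivot)) (List.range' (conf.length / 2) (conf.length - conf.length / 2)) <;>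
          simp [pvAOuter, hi, pvAInner_eq_find, h, List.find?, ih]

-- ===== VERDICT (by name: the statement is the Claim_ definition above) =====
theorem makeConfigurationAscending_spec : Claim_equal_makeConfigurationAscending := by
  intro configuration _
  unfold Spec_makeConfigurationAscending makeConfigurationAscending makeConfigurationAscending_alt
  rw [pvAOuter_eq]
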